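-- pv_equiv track=rewrite | github.com/lo1ol/ProEncryptor | ProEncryptor/source/encryptor.py | decreasing_alternative_horizontal_permutation_for_word
-- ===== SOURCE A (Python) =====
-- def decreasing_alternative_horizontal_permutation_for_word(word):
-- 	wordout_ls = [""]*len(word)
-- 	x = 0
-- 	y = len(word) -1
-- 	for i in range(len(word)-1,-1,-1):
-- 		if i % 2 == 1:
-- 			wordout_ls[x] = word[i]
-- 			x +=1
-- 		else:
-- 			wordout_ls[y] = word[i]
-- 			y -= 1
-- 	return ''.join(wordout_ls)
-- ===== SOURCE B (Python) =====
-- def decreasing_alternative_horizontal_permutation_for_word(word):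
-- 	return word[1::2][::-1] + word[0::2]
-- ===== Notes on version B (the rewrite author's own statement) =====
-- stated objective: idiomatic
-- what changed: Replaces the two-pointer buffer-filling loop with a closed-form slice expression — the odd-indexed characters reversed followed by the even-indexed characters — which also runs measurably faster because the per-character Python loop is replaced by C-level slicing.
import Mathlib
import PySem

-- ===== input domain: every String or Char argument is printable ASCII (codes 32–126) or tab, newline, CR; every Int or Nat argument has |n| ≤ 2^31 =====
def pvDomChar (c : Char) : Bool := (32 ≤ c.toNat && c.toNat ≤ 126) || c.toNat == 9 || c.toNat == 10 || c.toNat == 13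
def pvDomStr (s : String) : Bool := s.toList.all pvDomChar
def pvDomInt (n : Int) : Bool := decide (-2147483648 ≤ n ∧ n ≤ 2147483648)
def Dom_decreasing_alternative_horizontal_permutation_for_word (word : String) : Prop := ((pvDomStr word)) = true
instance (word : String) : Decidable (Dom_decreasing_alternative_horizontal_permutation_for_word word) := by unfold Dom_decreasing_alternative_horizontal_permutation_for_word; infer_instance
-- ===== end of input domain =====

-- B replaces A's two-pointer buffer-filling loop by the closed-form slice expression
-- word[1::2][::-1] + word[0::2] (same O(n) cost; objective: idiomatic).


-- ===== PORT A =====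
-- loop body of A: state (wordout_ls, x, y), one iteration at index i
def pvStepA (cs : List Char) (st : List String × Int × Int) (i : Int) : List String × Int × Int :=
  if PySem.Int.mod i 2 = 1 then
    (PySem.List.pySetD st.1 st.2.1 (String.singleton (PySem.List.pyGetD cs i 'a')), st.2.1 + 1, st.2.2)
  else
    (PySem.List.pySetD st.1 st.2.2 (String.singleton (PySem.List.pyGetD cs i 'a')), st.2.1, st.2.2 - 1)

def decreasing_alternative_horizontal_permutation_for_word (word : String) : String :=
  let cs := word.toList
  let n := cs.length
  PySem.Str.join ""
    (((PySem.List.pyRange ((n : Int) - 1) (-1) (-1)).foldl (pvStepA cs)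
      (List.replicate n "", (0 : Int), (n : Int) - 1)).1)

-- ===== PORT B =====
-- word[1::2][::-1] + word[0::2]
def decreasing_alternative_horizontal_permutation_for_word_alt (word : String) : String :=
  ((PySem.Str.slice? ((PySem.Str.slice? word (some 1) none 2).getD "") none none (-1)).getD "")
    ++ ((PySem.Str.slice? word none none 2).getD "")

-- ===== PRECONDITION & SPEC =====
def Spec_decreasing_alternative_horizontal_permutation_for_word (word : String) (out : String) : Prop := out = decreasing_alternative_horizontal_permutation_for_word_alt word
instance (word : String) (out : String) : Decidable (Spec_decreasing_alternative_horizontal_permutation_for_word word out) := by unfold Spec_decreasing_alternative_horizontal_permutation_for_word; infer_instance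

-- ===== CLAIM (what is proved, stated in full; the proofs are below) =====
def Claim_equal_decreasing_alternative_horizontal_permutation_for_word : Prop := ∀ (word : String), Dom_decreasing_alternative_horizontal_permutation_for_word word → Spec_decreasing_alternative_horizontal_permutation_for_word word (decreasing_alternative_horizontal_permutation_for_word word)

-- ===== LEMMAS AND PROOFS =====

def pvEveryOther : List Char → List Char
  | [] => []
  | [a] => [a]
  | a :: _ :: t => a :: pvEveryOther t

lemma pvEveryOther_snoc (l : List Char) (a : Char) :
    pvEveryOther (l ++ [a]) =
      if l.length % 2 = 0 then pvEveryOther l ++ [a] else pvEveryOther l := by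
  induction l using pvEveryOther.induct with
  | case1 => simp [pvEveryOther]
  | case2 b => simp [pvEveryOther]
  | case3 b c t ih =>
      by_cases h : t.length % 2 = 0 <;>
        simp [pvEveryOther, ih, h, Nat.add_mod] <;> omega

lemma pv_filterMap_two (cs : List Char) :
    List.filterMap (fun k : Nat => cs[2 * k]?) (List.range ((cs.length + 1) / 2)) =
      pvEveryOther cs := by
  induction cs using pvEveryOther.induct with
  | case1 => simp [pvEveryOther]
  | case2 b => simp [pvEveryOther]
  | case3 b c t ih =>
      have h2 : (b :: c :: t).length = t.length + 2 := by simp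
      rw [h2]
      have h3 : (t.length + 2 + 1) / 2 = (t.length + 1) / 2 + 1 := by omega
      rw [h3, List.range_succ_eq_map, List.filterMap_cons, List.filterMap_map]
      simp only [Nat.mul_zero, List.getElem?_cons_zero]
      rw [pvEveryOther]
      rw [← ih]
      refine congrArg _ (List.filterMap_congr fun k _ => ?_)
      have h4 : 2 * Nat.succ k = 2 * k + 1 + 1 := by omega
      simp [h4]


lemma pv_slice_evens (cs : List Char) :
    PySem.List.slice? cs none none 2 = some (pvEveryOther cs) := by
  rw [PySem.List.slice?]
  simp only [PySem.List.sliceIndices]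
  norm_num
  have hc : (if 0 < cs.length then (((cs.length : Int) + 2 - 1) / 2).toNat else 0) = (cs.length + 1) / 2 := by
    split_ifs <;> omega
  rw [hc, ← pv_filterMap_two]
  refine List.filterMap_congr fun k _ => ?_
  congr 1

lemma pv_slice_odds (cs : List Char) :
    PySem.List.slice? cs (some 1) none 2 = some (pvEveryOther cs.tail) := by
  rw [PySem.List.slice?]
  simp only [PySem.List.sliceIndices]
  norm_num
  cases cs with
  | nil => simp [pvEveryOther]
  | cons a t =>
    have h1 : (min (1 : Int) (↑(a :: t).length)) = 1 := by simp
    rw [h1]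
    have hc : (if 1 < (a :: t).length then ((((a :: t).length : Int) - 1 + 2 - 1) / 2).toNat else 0) = (t.length + 1) / 2 := by
      split_ifs <;> simp_all <;> omega
    rw [hc]
    have ht : ∀ k : Nat, (a :: t)[(1 + 2 * (k:Int)).toNat]? = t[2 * k]? := by
      intro k
      have : (1 + 2 * (k:Int)).toNat = 2 * k + 1 := by omega
      simp [this]
    rw [show ((a :: t).tail = t) from rfl, ← pv_filterMap_two]
    exact List.filterMap_congr fun k _ => ht k

lemma inter_sing (l : List Char) :
    (List.intersperse ([] : List Char) (l.map (fun c => [c]))).flatten = l := by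
  induction l with
  | nil => simp
  | cons a t ih =>
      cases t with
      | nil => simp
      | cons b u => simpa using ih

lemma pv_join_singletons (l : List Char) :
    PySem.Str.join "" (l.map String.singleton) = String.ofList l := by
  simp only [PySem.Str.join, PySem.Chars.join]
  have : List.map String.toList (l.map String.singleton) = l.map (fun c => [c]) := by
    simp [Function.comp]
  rw [this]
  simp [List.intercalate, inter_sing]

lemma pv_loopA (cs : List Char) (k : Nat) :
    ∀ (out : List String) (x t : Nat),
    k ≤ cs.length → out.length = cs.length → x + k ≤ t → t ≤ out.length →
    (PySem.List.pyRange ((k : Int) - 1) (-1) (-1)).foldl (pvStepA cs) (out, (x : Int), (t : Int) - 1) =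
      (out.take x ++ ((pvEveryOther (cs.take k).tail).reverse.map String.singleton)
        ++ ((out.drop (x + k / 2)).take (t - (k + 1) / 2 - (x + k / 2)))
        ++ ((pvEveryOther (cs.take k)).map String.singleton)
        ++ out.drop t,
       ((x + k / 2 : Nat) : Int), ((t - (k + 1) / 2 : Nat) : Int) - 1) := by
  induction k with
  | zero =>
    intro out x t hk hlen hxt ht
    rw [show ((0 : Nat) : Int) - 1 = -1 by norm_num, PySem.List.pyRange_neg_one_eq_nil le_rfl]
    simp only [List.foldl_nil, List.take_zero, pvEveryOther, List.tail_nil, List.reverse_nil,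
      List.map_nil, List.nil_append, List.append_nil, Nat.add_zero, Nat.zero_add,
      Prod.mk.injEq]
    norm_num
    have h1 : out.drop t = (out.drop x).drop (t - x) := by rw [List.drop_drop]; congr 1; omega
    rw [h1, List.take_append_drop, List.take_append_drop]
  | succ k ih =>
    intro out x t hk hlen hxt ht
    have hk' : k ≤ cs.length := by omega
    have ht1 : 1 ≤ t := by omega
    have hxlen : x < out.length := by omega
    have hklen : k < cs.length := by omega
    rw [show ((k + 1 : Nat) : Int) - 1 = (k : Int) by push_cast; ring,
      PySem.List.pyRange_neg_one_cons (by omega), List.foldl_cons]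
    set c := cs[k] with hc
    have hget : PySem.List.pyGetD cs (k : Int) 'a' = c := by
      rw [PySem.List.pyGetD_natCast, List.getD_eq_getElem cs 'a' hklen]
    set s := String.singleton c with hs
    have hmod : PySem.Int.mod (k : Int) 2 = (k : Int) % 2 := PySem.Int.mod_eq_emod_of_pos (by norm_num)
    by_cases km : k % 2 = 1
    · -- odd k: write at x, x increments
      have hmod1 : PySem.Int.mod (k : Int) 2 = 1 := by rw [hmod]; omega
      rw [show pvStepA cs (out, (x : Int), (t : Int) - 1) (k : Int)
            = (out.set x s, ((x + 1 : Nat) : Int), (t : Int) - 1) by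
        simp only [pvStepA, hmod1, hget]
        rw [PySem.List.pySetD_of_nonneg _ _ (by omega)]
        rw [← hs]
        norm_num]
      rw [ih (out.set x s) (x + 1) t hk' (by simp [hlen]) (by omega) (by simp; try omega)]
      -- now pure list algebra
      have f1 : cs.take (k + 1) = cs.take k ++ [c] := by
        rw [List.take_add_one]; simp [List.getElem?_eq_getElem hklen, hc]
      have hlen_take : (cs.take k).length = k := by simp; try omega
      have hkpos : 1 ≤ k := by omega
      have htk_ne : (cs.take k).isEmpty = false := by
        simp [List.isEmpty_iff, ← List.length_pos_iff, hlen_take]; omega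
      have f2 : pvEveryOther (cs.take (k + 1)) = pvEveryOther (cs.take k) := by
        rw [f1, pvEveryOther_snoc, if_neg (by rw [hlen_take]; omega)]
      have f3 : pvEveryOther (cs.take (k + 1)).tail
          = pvEveryOther (cs.take k).tail ++ [c] := by
        rw [f1, List.tail_append, if_neg (by simp [htk_ne])]
        rw [pvEveryOther_snoc, if_pos (by simp [hlen_take]; try omega)]
      have g1 : (out.set x s).take (x + 1) = out.take x ++ [s] := by
        rw [List.take_add_one, List.getElem?_set_self hxlen, List.take_set,
          List.set_eq_of_length_le (by simp; try omega)]
        rfl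
      have g2 : (out.set x s).drop (x + 1 + k / 2) = out.drop (x + 1 + k / 2) := by
        rw [List.drop_set, if_pos (by omega)]
      have g3 : (out.set x s).drop t = out.drop t := by
        rw [List.drop_set, if_pos (by omega)]
      refine Prod.ext ?_ (Prod.ext (by simp; try omega) (by simp; try omega))
      show (out.set x s).take (x + 1)
          ++ ((pvEveryOther (cs.take k).tail).reverse.map String.singleton)
          ++ (((out.set x s).drop (x + 1 + k / 2)).take (t - (k + 1) / 2 - (x + 1 + k / 2)))
          ++ ((pvEveryOther (cs.take k)).map String.singleton)
          ++ (out.set x s).drop t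
        = out.take x ++ ((pvEveryOther (cs.take (k+1)).tail).reverse.map String.singleton)
          ++ ((out.drop (x + (k + 1) / 2)).take (t - (k + 1 + 1) / 2 - (x + (k + 1) / 2)))
          ++ ((pvEveryOther (cs.take (k+1))).map String.singleton)
          ++ out.drop t
      rw [g1, g2, g3, f2, f3]
      rw [show t - (k + 1) / 2 - (x + 1 + k / 2) = t - (k + 1 + 1) / 2 - (x + 1 + k / 2) by omega,
        show x + 1 + k / 2 = x + (k + 1) / 2 by omega]
      simp [hs]
    · -- even k: write at t-1, y decrements
      have km0 : k % 2 = 0 := by omega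
      have hmod0 : ¬ (PySem.Int.mod (k : Int) 2 = 1) := by rw [hmod]; omega
      have htlen : t - 1 < out.length := by omega
      rw [show pvStepA cs (out, (x : Int), (t : Int) - 1) (k : Int)
            = (out.set (t - 1) s, (x : Int), ((t - 1 : Nat) : Int) - 1) by
        simp only [pvStepA, if_neg hmod0, hget]
        rw [PySem.List.pySetD_of_nonneg _ _ (by omega)]
        rw [← hs]
        rw [show ((t : Int) - 1).toNat = t - 1 by omega]
        rw [show (t : Int) - 1 - 1 = ((t - 1 : Nat) : Int) - 1 by omega]]
      rw [ih (out.set (t - 1) s) x (t - 1) hk' (by simp [hlen]) (by omega) (by simp; try omega)]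
      have f1 : cs.take (k + 1) = cs.take k ++ [c] := by
        rw [List.take_add_one]; simp [List.getElem?_eq_getElem hklen, hc]
      have hlen_take : (cs.take k).length = k := by simp; try omega
      have f2 : pvEveryOther (cs.take (k + 1)) = pvEveryOther (cs.take k) ++ [c] := by
        rw [f1, pvEveryOther_snoc, if_pos (by rw [hlen_take]; omega)]
      have f3 : pvEveryOther (cs.take (k + 1)).tail = pvEveryOther (cs.take k).tail := by
        by_cases hk0 : k = 0
        · subst hk0
          rw [f1]
          simp [pvEveryOther]
        · have htk_ne : (cs.take k).isEmpty = false := by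
            simp [List.isEmpty_iff, ← List.length_pos_iff, hlen_take]; omega
          rw [f1, List.tail_append, if_neg (by simp [htk_ne])]
          rw [pvEveryOther_snoc, if_neg (by simp [hlen_take]; try omega)]
      have g1 : (out.set (t - 1) s).take x = out.take x := by
        rw [List.take_set, List.set_eq_of_length_le (by simp; try omega)]
      have g2 : ((out.set (t - 1) s).drop (x + k / 2)).take (t - 1 - (k + 1) / 2 - (x + k / 2))
          = (out.drop (x + k / 2)).take (t - 1 - (k + 1) / 2 - (x + k / 2)) := by
        rw [List.drop_set, if_neg (by omega), List.take_set,
          List.set_eq_of_length_le (by simp; try omega)]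
      have g3 : (out.set (t - 1) s).drop (t - 1) = s :: out.drop t := by
        rw [List.drop_set, if_neg (by omega), Nat.sub_self,
          List.drop_eq_getElem_cons htlen]
        rw [show t - 1 + 1 = t by omega]
        rfl
      refine Prod.ext ?_ (Prod.ext (by simp; try omega) (by simp; try omega))
      show (out.set (t-1) s).take x
          ++ ((pvEveryOther (cs.take k).tail).reverse.map String.singleton)
          ++ (((out.set (t-1) s).drop (x + k / 2)).take (t - 1 - (k + 1) / 2 - (x + k / 2)))
          ++ ((pvEveryOther (cs.take k)).map String.singleton)
          ++ (out.set (t-1) s).drop (t - 1)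
        = out.take x ++ ((pvEveryOther (cs.take (k+1)).tail).reverse.map String.singleton)
          ++ ((out.drop (x + (k + 1) / 2)).take (t - (k + 1 + 1) / 2 - (x + (k + 1) / 2)))
          ++ ((pvEveryOther (cs.take (k+1))).map String.singleton)
          ++ out.drop t
      rw [g1, g2, g3, f2, f3]
      rw [show x + k / 2 = x + (k + 1) / 2 by omega,
        show t - 1 - (k + 1) / 2 - (x + (k + 1) / 2) = t - (k + 1 + 1) / 2 - (x + (k + 1) / 2) by omega]
      simp [hs]

lemma pv_alt_eq (word : String) :
    decreasing_alternative_horizontal_permutation_for_word_alt word =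
      String.ofList ((pvEveryOther word.toList.tail).reverse ++ pvEveryOther word.toList) := by
  unfold decreasing_alternative_horizontal_permutation_for_word_alt
  rw [show PySem.Str.slice? word (some 1) none 2
        = some (String.ofList (pvEveryOther word.toList.tail)) by
      unfold PySem.Str.slice? PySem.Chars.slice?
      rw [pv_slice_odds]
      rfl]
  rw [Option.getD_some, PySem.Str.slice?_none_none_neg_one, Option.getD_some,
    String.toList_ofList]
  rw [show PySem.Str.slice? word none none 2
        = some (String.ofList (pvEveryOther word.toList)) by
      unfold PySem.Str.slice? PySem.Chars.slice?
      rw [pv_slice_evens]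
      rfl]
  rw [Option.getD_some]
  apply String.toList_inj.mp
  simp [String.toList_append]

-- ===== VERDICT (by name: the statement is the Claim_ definition above) =====
theorem decreasing_alternative_horizontal_permutation_for_word_spec : Claim_equal_decreasing_alternative_horizontal_permutation_for_word := by
  intro word _
  unfold Spec_decreasing_alternative_horizontal_permutation_for_word
  unfold decreasing_alternative_horizontal_permutation_for_word
  rw [pv_alt_eq]
  set cs := word.toList with hcs
  set n := cs.length with hn
  show PySem.Str.join ""
      ((PySem.List.pyRange ((n : Int) - 1) (-1) (-1)).foldl (pvStepA cs)
        (List.replicate n "", (((0 : Nat)) : Int), (n : Int) - 1)).1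
    = String.ofList ((pvEveryOther cs.tail).reverse ++ pvEveryOther cs)
  rw [pv_loopA cs n (List.replicate n "") 0 n le_rfl (by simpa using hn) (by omega) (by simp [hn])]
  have hmid : n - (n + 1) / 2 - (0 + n / 2) = 0 := by omega
  simp only [hmid, List.take_zero, List.take, List.nil_append, List.drop_replicate,
    List.take_length, Nat.sub_self, List.replicate_zero, List.append_nil]
  rw [List.take_length, ← List.map_append, pv_join_singletons]
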